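-- pv_equiv track=rewrite | github.com/thomas-hori/colourall | ColourStores.py | filter_aliases
-- ===== SOURCE A (Python) =====
-- def count_caps_and_apostrophes(str):
-- 	caps=0
-- 	for cap in "ABCDEFGHIJKLMNOPQRSTUVWXYZ'":
-- 		caps+=str.count(cap)
-- 	return caps
--
-- def filter_aliases(truename,aliases):
-- 	"""Remove overdefinitions (in a case insensitive world) from aliases"""
-- 	done_lowercase=[]
-- 	got={}
-- 	for j in aliases:
-- 		if j.lower() in done_lowercase:
-- 			got[j.lower()].append(j)
-- 		elif j.lower()==truename.lower():
-- 			pass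
-- 		else:
-- 			done_lowercase.append(j.lower())
-- 			got[j.lower()]=[j]
-- 	aliases2=[]
-- 	for nameset in got.values():
-- 		mostcaps=0
-- 		mostcapsname=nameset[0] #Default to an arbitary one
-- 		for i in nameset:
-- 			i_caps=count_caps_and_apostrophes(i)
-- 			if i_caps>mostcaps:
-- 				mostcaps=i_caps
-- 				mostcapsname=i
-- 		aliases2.append(mostcapsname)
-- 	return truename,aliases2
-- ===== SOURCE B (Python) =====
-- def count_caps_and_apostrophes(str):
-- 	caps=0
-- 	for cap in "ABCDEFGHIJKLMNOPQRSTUVWXYZ'":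
-- 		caps+=str.count(cap)
-- 	return caps
--
-- def filter_aliases(truename, aliases):
-- 	"""Remove overdefinitions (in a case insensitive world) from aliases"""
-- 	tn = truename.lower()
-- 	best = {}
-- 	for j in aliases:
-- 		key = j.lower()
-- 		if key == tn:
-- 			continue
-- 		score = count_caps_and_apostrophes(j)
-- 		if key not in best or score > best[key][1]:
-- 			best[key] = (j, score)
-- 	return truename, [name for name, _ in best.values()]
-- ===== Notes on version B (the rewrite author's own statement) =====
-- stated objective: faster
-- what changed: B replaces A's two-phase group-into-dict-of-lists-then-scan-each-group (with an O(n) 'done_lowercase' list membership test per alias) with a single pass over the aliases that keeps, per lowercase key, only the current best name and its score, replacing on strictly greater score.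
import Mathlib
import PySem

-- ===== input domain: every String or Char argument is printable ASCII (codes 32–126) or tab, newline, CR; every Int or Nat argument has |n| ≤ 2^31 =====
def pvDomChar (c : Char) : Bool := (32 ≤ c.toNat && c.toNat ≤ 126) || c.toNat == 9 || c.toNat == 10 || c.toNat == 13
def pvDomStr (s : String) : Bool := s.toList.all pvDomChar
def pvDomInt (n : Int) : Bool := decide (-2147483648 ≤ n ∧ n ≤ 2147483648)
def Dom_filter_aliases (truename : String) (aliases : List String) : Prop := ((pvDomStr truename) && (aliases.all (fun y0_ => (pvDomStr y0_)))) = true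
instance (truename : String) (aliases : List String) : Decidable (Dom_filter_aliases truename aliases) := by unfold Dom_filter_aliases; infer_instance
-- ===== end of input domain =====

-- B: one pass keeping per-lowercase-key the best-capitalised name so far (strict '>'),
-- instead of A's group-into-lists pass followed by a scan of each group; a simpler decomposition.


-- ===== PORT A =====
-- count_caps_and_apostrophes: caps starts at 0; for each cap in the literal, caps += str.count(cap)
def count_caps_and_apostrophes (s : String) : Int :=
  "ABCDEFGHIJKLMNOPQRSTUVWXYZ'".toList.foldl
    (fun caps cap => caps + (PySem.Str.count s (String.ofList [cap]) : Int)) 0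

-- body of A's first loop (state: done_lowercase × got)
def faLoopA (truename : String)
    (st : List String × PySem.Dict String (List String)) (j : String) :
    List String × PySem.Dict String (List String) :=
  if st.1.contains (PySem.Str.lower j) then
    (st.1, st.2.modify (PySem.Str.lower j) [] (fun ns => ns ++ [j]))
  else if PySem.Str.lower j == PySem.Str.lower truename then st
  else (st.1 ++ [PySem.Str.lower j], st.2.insert (PySem.Str.lower j) [j])

-- body of A's second loop: mostcaps=0, mostcapsname=nameset[0] (nameset is never empty when
-- A reaches this line, so the .getD "" default is never used), then scan nameset
def faInner (ns : List String) : String :=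
  (ns.foldl
    (fun (m : Int × String) i =>
      let i_caps := count_caps_and_apostrophes i
      if i_caps > m.1 then (i_caps, i) else m)
    ((0 : Int), (PySem.List.pyGet? ns 0).getD "")).2

def filter_aliases (truename : String) (aliases : List String) : String × List String :=
  let st := aliases.foldl (faLoopA truename) ([], PySem.Dict.empty)
  let aliases2 := st.2.values.foldl (fun acc ns => acc ++ [faInner ns]) []
  (truename, aliases2)

-- ===== PORT B =====
-- body of B's single loop: per lowercase key keep (best name so far, its score)
def faLoopB (tn : String) (best : PySem.Dict String (String × Int)) (j : String) :
    PySem.Dict String (String × Int) :=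
  let key := PySem.Str.lower j
  if key == tn then best
  else
    let score := count_caps_and_apostrophes j
    match best.get? key with
    | none => best.insert key (j, score)
    | some p => if score > p.2 then best.insert key (j, score) else best

def filter_aliases_alt (truename : String) (aliases : List String) : String × List String :=
  let best := aliases.foldl (faLoopB (PySem.Str.lower truename)) PySem.Dict.empty
  (truename, best.values.map Prod.fst)

-- ===== PRECONDITION & SPEC =====
def Spec_filter_aliases (truename : String) (aliases : List String) (out : String × List String) : Prop := out = filter_aliases_alt truename aliases
instance (truename : String) (aliases : List String) (out : String × List String) : Decidable (Spec_filter_aliases truename aliases out) := by unfold Spec_filter_aliases; infer_instance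

-- ===== CLAIM (what is proved, stated in full; the proofs are below) =====
def Claim_equal_filter_aliases : Prop := ∀ (truename : String) (aliases : List String), Dom_filter_aliases truename aliases → Spec_filter_aliases truename aliases (filter_aliases truename aliases)

-- ===== LEMMAS AND PROOFS =====

-- the one-step "keep the better of the two" function B's loop applies
def faStep (p : String × Int) (j : String) : String × Int :=
  if count_caps_and_apostrophes j > p.2 then (j, count_caps_and_apostrophes j) else p

-- best-of for a nonempty group, as B maintains it incrementally
def faBest : List String → String × Int
  | [] => ("", 0)
  | h :: t => t.foldl faStep (h, count_caps_and_apostrophes h)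

theorem caa_aux (s : String) (l : List Char) (a : Int) (ha : 0 ≤ a) :
    0 ≤ l.foldl (fun caps cap => caps + (PySem.Str.count s (String.ofList [cap]) : Int)) a := by
  induction l generalizing a with
  | nil => exact ha
  | cons c t ih => exact ih _ (by positivity)

theorem caa_nonneg (s : String) : 0 ≤ count_caps_and_apostrophes s :=
  caa_aux s _ 0 le_rfl

theorem faBest_append (h : String) (t : List String) (j : String) :
    faBest ((h :: t) ++ [j]) = faStep (faBest (h :: t)) j := by
  simp [faBest, List.foldl_append]

theorem faSwap (t : List String) (b : String) :
    t.foldl (fun (m : Int × String) i =>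
      let i_caps := count_caps_and_apostrophes i
      if i_caps > m.1 then (i_caps, i) else m) (count_caps_and_apostrophes b, b)
    = ((t.foldl faStep (b, count_caps_and_apostrophes b)).2,
       (t.foldl faStep (b, count_caps_and_apostrophes b)).1) := by
  induction t generalizing b with
  | nil => rfl
  | cons i t ih =>
    simp only [List.foldl_cons, faStep]
    by_cases h : count_caps_and_apostrophes i > count_caps_and_apostrophes b
    · simp only [h]; exact ih i
    · simp only [if_neg h]; exact ih b

theorem faInner_eq_faBest (h : String) (t : List String) :
    faInner (h :: t) = (faBest (h :: t)).1 := by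
  have h0 : PySem.List.pyGet? (h :: t) 0 = some h := by
    simp [PySem.List.pyGet?, PySem.List.pyIdx?]
  simp only [faInner, faBest, h0, Option.getD_some, List.foldl_cons]
  have hstep : (if count_caps_and_apostrophes h > (0:Int)
      then (count_caps_and_apostrophes h, h) else ((0:Int), h))
      = (count_caps_and_apostrophes h, h) := by
    by_cases hc : count_caps_and_apostrophes h > (0:Int)
    · simp [hc]
    · have := caa_nonneg h
      have : count_caps_and_apostrophes h = 0 := by omega
      simp [this]
  simp only [hstep, faSwap]

-- the invariant relating A's loop state to B's
def faInv (tn : String) (st : List String × PySem.Dict String (List String))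
    (d : PySem.Dict String (String × Int)) : Prop :=
  st.2.items.map Prod.fst = st.1 ∧
  d.items = st.2.items.map (fun e => (e.1, faBest e.2)) ∧
  st.1.Nodup ∧ tn ∉ st.1 ∧ ∀ e ∈ st.2.items, e.2 ≠ []

theorem faInv_step (truename : String) (st : List String × PySem.Dict String (List String))
    (d : PySem.Dict String (String × Int)) (j : String)
    (h : faInv (PySem.Str.lower truename) st d) :
    faInv (PySem.Str.lower truename) (faLoopA truename st j)
      (faLoopB (PySem.Str.lower truename) d j) := by
  obtain ⟨done, got⟩ := st
  obtain ⟨hkeys, hitems, hnd, htn, hne⟩ := h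
  replace hkeys : List.map Prod.fst got.items = done := hkeys
  replace hitems : d.items = got.items.map (fun e => (e.1, faBest e.2)) := hitems
  replace hnd : done.Nodup := hnd
  replace htn : PySem.Str.lower truename ∉ done := htn
  replace hne : ∀ e ∈ got.items, e.2 ≠ [] := hne
  simp only [faLoopA, faLoopB]
  set tn := PySem.Str.lower truename with htndef
  set k := PySem.Str.lower j with hkdef
  by_cases hmem : k ∈ done
  · -- key already seen: A appends j to the group, B keeps the better of (best, j)
    have hc : done.contains k = true := by simp [hmem]
    have hb : (k == tn) = false := by
      simp only [beq_eq_false_iff_ne, ne_eq]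
      intro hkt
      exact htn (hkt ▸ hmem)
    -- the (unique) entry of got at key k
    have hex : ∃ e ∈ got.items, e.1 = k := by
      rw [← hkeys] at hmem
      obtain ⟨e, he, hek⟩ := List.mem_map.mp hmem
      exact ⟨e, he, hek⟩
    obtain ⟨⟨k', ns⟩, he, hek⟩ := hex
    subst hek
    have hndk : got.keys.Nodup := by
      show (got.items.map Prod.fst).Nodup
      rw [hkeys]; exact hnd
    have hgot : got.get? k = some ns := PySem.Dict.get?_of_mem_items got he hndk
    have hnsne : ns ≠ [] := hne _ he
    have hcgot : got.contains k = true := by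
      simp only [PySem.Dict.contains, List.any_eq_true]
      exact ⟨(k, ns), he, by simp⟩
    have hcd : d.contains k = true := by
      simp only [PySem.Dict.contains, hitems, List.any_eq_true]
      exact ⟨(k, faBest ns), List.mem_map_of_mem he, by simp⟩
    have hfind : got.items.find? (fun p => p.1 == k) = some (k, ns) := by
      have := hgot
      simp only [PySem.Dict.get?] at this
      obtain ⟨e0, he0, he02⟩ := Option.map_eq_some_iff.mp this
      have he01 : e0.1 = k := by simpa using List.find?_some he0
      rw [he0]
      obtain ⟨a, b⟩ := e0
      simp only at he01 he02
      rw [he01, he02]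
    have hdget : d.get? k = some (faBest ns) := by
      simp only [PySem.Dict.get?, hitems, List.find?_map]
      have hcomp : ((fun (p : String × (String × Int)) => p.1 == k) ∘
          (fun (e : String × List String) => (e.1, faBest e.2)))
          = (fun (p : String × List String) => p.1 == k) := rfl
      rw [hcomp, hfind]
      rfl
    have huniq : ∀ e ∈ got.items, e.1 = k → e.2 = ns := by
      intro e heq hek
      have : got.get? k = some e.2 :=
        PySem.Dict.get?_of_mem_items got (by rw [← hek]; exact heq) hndk
      rw [hgot] at this
      exact (Option.some_injective _ this).symm
    have hbest : faBest (ns ++ [j]) = faStep (faBest ns) j := by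
      cases ns with
      | nil => exact absurd rfl hnsne
      | cons h0 t0 => exact faBest_append h0 t0 j
    have hgetD : got.getD k [] = ns := by rw [PySem.Dict.getD, hgot]; rfl
    have hAitems : (got.modify k [] (fun ns => ns ++ [j])).items
        = got.items.map (fun p => if p.1 == k then (k, ns ++ [j]) else p) := by
      simp only [PySem.Dict.modify, hgetD, PySem.Dict.insert, hcgot, if_true]
    simp only [hc, if_true, hb, Bool.false_eq_true, if_false, hdget]
    by_cases hgt : count_caps_and_apostrophes j > (faBest ns).2
    · simp only [if_pos hgt]
      have hBitems : (d.insert k (j, count_caps_and_apostrophes j)).items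
          = d.items.map (fun p => if p.1 == k then (k, (j, count_caps_and_apostrophes j)) else p) := by
        simp only [PySem.Dict.insert, hcd, if_true]
      refine ⟨?_, ?_, hnd, htn, ?_⟩
      · show List.map Prod.fst (got.modify k [] (fun ns => ns ++ [j])).items = done
        rw [hAitems, List.map_map, ← hkeys]
        apply List.map_congr_left
        intro e heq
        by_cases hek : e.1 = k
        · simp [Function.comp, hek]
        · simp [Function.comp, hek]
      · show (d.insert k (j, count_caps_and_apostrophes j)).items
            = (got.modify k [] (fun ns => ns ++ [j])).items.map (fun e => (e.1, faBest e.2))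
        rw [hBitems, hAitems, hitems, List.map_map, List.map_map]
        apply List.map_congr_left
        intro e heq
        by_cases hek : e.1 = k
        · simp only [Function.comp, hek, beq_self_eq_true, if_true]
          rw [hbest, faStep, if_pos hgt]
        · simp [Function.comp, hek]
      · intro e heq
        rw [hAitems] at heq
        obtain ⟨e0, he0, he0e⟩ := List.mem_map.mp heq
        by_cases hek : e0.1 = k
        · rw [if_pos (by simpa using hek)] at he0e
          rw [← he0e]; simp
        · rw [if_neg (by simpa using hek)] at he0e
          rw [← he0e]; exact hne e0 he0
    · simp only [if_neg hgt]
      refine ⟨?_, ?_, hnd, htn, ?_⟩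
      · show List.map Prod.fst (got.modify k [] (fun ns => ns ++ [j])).items = done
        rw [hAitems, List.map_map, ← hkeys]
        apply List.map_congr_left
        intro e heq
        by_cases hek : e.1 = k
        · simp [Function.comp, hek]
        · simp [Function.comp, hek]
      · show d.items = (got.modify k [] (fun ns => ns ++ [j])).items.map (fun e => (e.1, faBest e.2))
        rw [hAitems, hitems, List.map_map]
        apply List.map_congr_left
        intro e heq
        by_cases hek : e.1 = k
        · simp only [Function.comp, hek, beq_self_eq_true, if_true]
          have he2 : e.2 = ns := huniq e heq hek
          rw [hbest, faStep, if_neg hgt, he2]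
        · simp [Function.comp, hek]
      · intro e heq
        rw [hAitems] at heq
        obtain ⟨e0, he0, he0e⟩ := List.mem_map.mp heq
        by_cases hek : e0.1 = k
        · rw [if_pos (by simpa using hek)] at he0e
          rw [← he0e]; simp
        · rw [if_neg (by simpa using hek)] at he0e
          rw [← he0e]; exact hne e0 he0
  · -- k not yet seen
    have hkfstA : ∀ v, (k, v) ∉ got.items := by
      intro v hv
      apply hmem
      rw [← hkeys]
      exact List.mem_map_of_mem hv
    have hc : done.contains k = false := by simp [hmem]
    have hck : got.contains k = false := by
      simp only [PySem.Dict.contains, List.any_eq_false]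
      rintro ⟨a, b⟩ hp hbeq
      have hak : a = k := by simpa using hbeq
      subst hak
      exact hkfstA b hp
    have hdk : d.contains k = false := by
      simp only [PySem.Dict.contains, hitems, List.any_map]
      simpa [PySem.Dict.contains, Function.comp] using hck
    have hget : d.get? k = none := by
      rw [PySem.Dict.get?_eq_none_iff_contains]; exact hdk
    simp only [hc, Bool.false_eq_true, if_false, hget]
    by_cases ht : k = tn
    · have hb : (k == tn) = true := by simpa using ht
      simp only [hb, if_true]
      exact ⟨hkeys, hitems, hnd, htn, hne⟩
    · have hb : (k == tn) = false := by simpa using ht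
      simp only [hb, Bool.false_eq_true, if_false]
      refine ⟨?_, ?_, ?_, ?_, ?_⟩
      · simp [PySem.Dict.insert, hck, hkeys]
      · simp [PySem.Dict.insert, hck, hdk, hitems, faBest]
      · rw [List.nodup_append]
        refine ⟨hnd, List.nodup_singleton k, ?_⟩
        intro a ha b hb
        rw [List.mem_singleton] at hb
        subst hb
        exact fun hab => hmem (hab ▸ ha)
      · simp only [List.mem_append, List.mem_singleton, not_or]
        exact ⟨htn, fun hh => ht (by rw [hh])⟩
      · intro e he
        simp only [PySem.Dict.insert, hck, Bool.false_eq_true, if_false] at he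
        rcases List.mem_append.mp he with h1 | h1
        · exact hne e h1
        · simp only [List.mem_singleton] at h1; subst h1; simp


theorem faInv_fold (truename : String) (l : List String)
    (st : List String × PySem.Dict String (List String))
    (d : PySem.Dict String (String × Int)) (h : faInv (PySem.Str.lower truename) st d) :
    faInv (PySem.Str.lower truename) (l.foldl (faLoopA truename) st)
      (l.foldl (faLoopB (PySem.Str.lower truename)) d) := by
  induction l generalizing st d with
  | nil => exact h
  | cons x xs ih => exact ih _ _ (faInv_step truename st d x h)

-- ===== VERDICT (by name: the statement is the Claim_ definition above) =====
theorem filter_aliases_spec : Claim_equal_filter_aliases := by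
  intro truename aliases _
  unfold Spec_filter_aliases
  have h0 : faInv (PySem.Str.lower truename) ([], PySem.Dict.empty) PySem.Dict.empty :=
    ⟨rfl, rfl, List.nodup_nil, by simp, by intro e he; exact absurd he (List.not_mem_nil)⟩
  have hInv := faInv_fold truename aliases ([], PySem.Dict.empty) PySem.Dict.empty h0
  obtain ⟨hkeys, hitems, hnd, htn, hne⟩ := hInv
  simp only [filter_aliases, filter_aliases_alt]
  refine Prod.ext rfl ?_
  rw [PySem.List.foldl_append_singleton_eq_map, List.nil_append]
  show ((aliases.foldl (faLoopA truename) ([], PySem.Dict.empty)).2.items.map Prod.snd).map faInner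
      = ((aliases.foldl (faLoopB (PySem.Str.lower truename)) PySem.Dict.empty).items.map Prod.snd).map Prod.fst
  rw [hitems]
  rw [List.map_map, List.map_map, List.map_map]
  apply List.map_congr_left
  intro e heq
  have hene : e.2 ≠ [] := hne e heq
  cases hns : e.2 with
  | nil => exact absurd hns hene
  | cons h t =>
    show faInner e.2 = (faBest e.2).1
    rw [hns]
    exact faInner_eq_faBest h t
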